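-- pv_equiv track=rewrite | github.com/nightingaleandrew/Image-Delineation-Program-Public | figure_custom_classes.py | create_polgon_lines
-- ===== SOURCE A (Python) =====
-- def create_polgon_lines(polygon_co_ordinates):
--     lines = []
--     i = 0
--     co_ordinates = []
--     for x, y in polygon_co_ordinates: #I convert them all to tuples just for neatness (this is not essential)
--         co_ordinates.append((x, y))
--     while i < len(co_ordinates):
--         if i == len(co_ordinates) - 1: #The first co-ordinate needs to be added again as the polygon joins up
--             lines.append([co_ordinates[i], co_ordinates[0]])
--         else:
--             lines.append([co_ordinates[i], co_ordinates[i + 1]]) #add the co-ordinate A and also the next one along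
--         i += 1
--     return lines
-- ===== SOURCE B (Python) =====
-- def create_polgon_lines(polygon_co_ordinates):
--     def walk(first, cur, rest):
--         # recurse along the remaining vertices; the base case emits the closing edge
--         if not rest:
--             return [[cur, first]]
--         x, y = rest[0]
--         nxt = (x, y)
--         return [[cur, nxt]] + walk(first, nxt, rest[1:])
--     if not polygon_co_ordinates:
--         return []
--     x, y = polygon_co_ordinates[0]
--     first = (x, y)
--     return walk(first, first, polygon_co_ordinates[1:])
-- ===== Notes on version B (the rewrite author's own statement) =====
-- stated objective: alternative
-- what changed: Replaces A's indexed while loop with its last-vertex wraparound branch by a structural recursion that threads the remembered first vertex and the current vertex down the list, emitting the closing edge at the base case.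
import Mathlib
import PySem

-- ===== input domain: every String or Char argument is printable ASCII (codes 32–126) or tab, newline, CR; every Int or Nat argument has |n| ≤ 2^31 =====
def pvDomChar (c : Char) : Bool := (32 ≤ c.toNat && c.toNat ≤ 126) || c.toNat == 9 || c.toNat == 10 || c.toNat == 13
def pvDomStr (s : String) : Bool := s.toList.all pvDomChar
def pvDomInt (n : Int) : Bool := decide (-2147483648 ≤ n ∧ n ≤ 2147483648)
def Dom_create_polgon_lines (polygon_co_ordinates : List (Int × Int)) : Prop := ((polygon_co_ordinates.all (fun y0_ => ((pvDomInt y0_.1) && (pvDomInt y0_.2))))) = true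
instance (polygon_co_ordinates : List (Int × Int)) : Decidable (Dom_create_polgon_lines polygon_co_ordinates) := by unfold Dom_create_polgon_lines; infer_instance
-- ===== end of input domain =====

-- B replaces A's indexed while loop and wraparound branch by a structural recursion
-- threading the first and current vertex, closing the polygon at the base case.

-- ===== PORT A =====
-- while loop with counter i ported as a foldl over List.range; co_ordinates[i] is
-- in range at every access, so getD with a dummy default is exact.
def create_polgon_lines (polygon_co_ordinates : List (Int × Int)) : List (List (Int × Int)) :=
  let co_ordinates : List (Int × Int) := polygon_co_ordinates.map (fun p => (p.1, p.2))
  (List.range co_ordinates.length).foldl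
    (fun lines i =>
      if i = co_ordinates.length - 1 then
        lines ++ [[co_ordinates.getD i (0, 0), co_ordinates.getD 0 (0, 0)]]
      else
        lines ++ [[co_ordinates.getD i (0, 0), co_ordinates.getD (i + 1) (0, 0)]])
    []

-- ===== PORT B =====
-- walk(first, cur, rest): structural recursion on rest, base case emits closing edge.
def pvWalk (first : Int × Int) : (Int × Int) → List (Int × Int) → List (List (Int × Int))
  | cur, [] => [[cur, first]]
  | cur, r :: rest => [[cur, (r.1, r.2)]] ++ pvWalk first (r.1, r.2) rest

def create_polgon_lines_alt (polygon_co_ordinates : List (Int × Int)) : List (List (Int × Int)) :=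
  match polygon_co_ordinates with
  | [] => []
  | p :: rest => pvWalk (p.1, p.2) (p.1, p.2) rest

-- ===== PRECONDITION & SPEC =====
def Spec_create_polgon_lines (polygon_co_ordinates : List (Int × Int)) (out : List (List (Int × Int))) : Prop := out = create_polgon_lines_alt polygon_co_ordinates
instance (polygon_co_ordinates : List (Int × Int)) (out : List (List (Int × Int))) : Decidable (Spec_create_polgon_lines polygon_co_ordinates out) := by unfold Spec_create_polgon_lines; infer_instance

-- ===== CLAIM (what is proved, stated in full; the proofs are below) =====
def Claim_equal_create_polgon_lines : Prop := ∀ (polygon_co_ordinates : List (Int × Int)), Dom_create_polgon_lines polygon_co_ordinates → Spec_create_polgon_lines polygon_co_ordinates (create_polgon_lines polygon_co_ordinates)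

-- ===== LEMMAS AND PROOFS =====

-- the i-th entry of the one-step rotation: the next vertex, wrapping to the head
theorem pv_rot_getD (l : List (Int × Int)) (i : Nat) (hi : i < l.length) :
    (l.drop 1 ++ l.take 1).getD i (0, 0) =
      if i = l.length - 1 then l.getD 0 (0, 0) else l.getD (i + 1) (0, 0) := by
  match l with
  | [] => simp at hi
  | a :: t =>
    simp only [List.drop_succ_cons, List.drop_zero, List.take_succ_cons, List.take_zero]
    rcases Nat.lt_or_ge i t.length with h | h
    · rw [List.getD_append t [a] (0, 0) i h]
      rw [if_neg (by simp; omega), List.getD_cons_succ]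
    · have hieq : i = t.length := by simp at hi; omega
      subst hieq
      simp

-- A's fold equals the pairing of the list with its one-step rotation
theorem pv_A_eq_zip (l : List (Int × Int)) :
    create_polgon_lines l = (l.zip (l.drop 1 ++ l.take 1)).map (fun p => [p.1, p.2]) := by
  unfold create_polgon_lines
  have hmap : l.map (fun p : Int × Int => (p.1, p.2)) = l := by simp
  simp only [hmap]
  have hflip :
      (fun (lines : List (List (Int × Int))) (i : Nat) =>
        if i = l.length - 1 then
          lines ++ [[l.getD i (0, 0), l.getD 0 (0, 0)]]
        else
          lines ++ [[l.getD i (0, 0), l.getD (i + 1) (0, 0)]]) =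
      fun lines i => lines ++
        [if i = l.length - 1 then [l.getD i (0, 0), l.getD 0 (0, 0)]
         else [l.getD i (0, 0), l.getD (i + 1) (0, 0)]] := by
    funext lines i
    split <;> rfl
  rw [hflip, PySem.List.foldl_append_singleton_eq_map, List.nil_append]
  apply List.ext_getElem
  · simp [List.length_take]
    omega
  · intro i hi hi2
    have hil : i < l.length := by simpa using hi
    have hrotlen : i < (l.drop 1 ++ l.take 1).length := by
      simp [List.length_take]; omega
    simp only [List.getElem_map, List.getElem_range, List.getElem_zip]
    have hrot := pv_rot_getD l i hil
    rw [List.getD_eq_getElem _ _ hrotlen] at hrot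
    rw [hrot]
    rcases eq_or_ne i (l.length - 1) with h | h
    · rw [if_pos h, if_pos h, List.getD_eq_getElem _ _ hil]
    · rw [if_neg h, if_neg h, List.getD_eq_getElem _ _ hil]

-- B's walk equals the same pairing, starting from (cur :: rest) closed by first
theorem pv_walk_eq_zip (first cur : Int × Int) (rest : List (Int × Int)) :
    pvWalk first cur rest =
      ((cur :: rest).zip (rest ++ [first])).map (fun p => [p.1, p.2]) := by
  induction rest generalizing cur with
  | nil => simp [pvWalk]
  | cons r t ih => simp [pvWalk, ih]

theorem create_polgon_lines_eq_alt (l : List (Int × Int)) :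
    create_polgon_lines l = create_polgon_lines_alt l := by
  rw [pv_A_eq_zip]
  match l with
  | [] => rfl
  | p :: rest =>
    have hb : create_polgon_lines_alt (p :: rest) = pvWalk (p.1, p.2) (p.1, p.2) rest := rfl
    rw [hb, pv_walk_eq_zip]
    simp

-- ===== VERDICT (by name: the statement is the Claim_ definition above) =====
theorem create_polgon_lines_spec : Claim_equal_create_polgon_lines := by
  intro l _
  unfold Spec_create_polgon_lines
  exact create_polgon_lines_eq_alt l
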